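-- pv_equiv track=rewrite | github.com/cccorn/Q-ATPG | lib/libspd.py | gf2_find_indp
-- ===== SOURCE A (Python) =====
-- def gf2_find_indp(rows):
--     rows=rows.copy()
--     out=[]
--     idx=len(rows)-1
--     while rows:
--         pivot_row = rows.pop()
--         if pivot_row:
--             out.append(idx)
--             lsb = pivot_row & -pivot_row
--             for index, row in enumerate(rows):
--                 if row & lsb:
--                     rows[index] = row ^ pivot_row
--         idx-=1
--     return out
-- ===== SOURCE B (Python) =====
-- def gf2_find_indp(rows):
--     pivots = []
--     out = []
--     for i in range(len(rows) - 1, -1, -1):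
--         v = rows[i]
--         for p in pivots:
--             if v & (p & -p):
--                 v ^= p
--         if v:
--             out.append(i)
--             pivots.append(v)
--     return out
-- ===== Notes on version B (the rewrite author's own statement) =====
-- stated objective: simpler
-- what changed: A eagerly rewrites every remaining row each time a pivot is found; B never touches the input rows and instead reduces each row lazily, once, against a growing list of pivot rows (same pivot order, same xor steps per row, so identical output).
import Mathlib
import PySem

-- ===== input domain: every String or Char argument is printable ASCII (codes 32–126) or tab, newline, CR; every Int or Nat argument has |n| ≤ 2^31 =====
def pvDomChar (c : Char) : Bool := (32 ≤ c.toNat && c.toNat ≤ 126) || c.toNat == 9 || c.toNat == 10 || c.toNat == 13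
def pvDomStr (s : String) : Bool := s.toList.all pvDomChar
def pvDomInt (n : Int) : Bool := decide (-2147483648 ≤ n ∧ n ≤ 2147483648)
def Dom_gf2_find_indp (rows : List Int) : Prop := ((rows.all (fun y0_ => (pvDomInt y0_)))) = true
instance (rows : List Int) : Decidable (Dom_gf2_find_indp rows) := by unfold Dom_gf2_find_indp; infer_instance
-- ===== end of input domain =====

-- B replaces A's eager elimination (rewriting every remaining row at each pivot) by a lazy
-- per-row reduction against a growing pivot list — simpler: rows are never rewritten.
-- A mutates only a local copy of its argument, so the caller sees no side effect.


-- ===== PORT A =====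
-- 'while rows: pivot_row = rows.pop(); …' ported as structural recursion over the REVERSED
-- list (pop-from-end = head of the reversed list); the in-place 'for index, row in
-- enumerate(rows): rows[index] = …' is a pointwise update, ported as List.map.
def aGo : List Int → Int → List Int
  | [], _ => []
  | pivot :: rest, idx =>
      if pivot ≠ 0 then
        let lsb := PySem.Int.band pivot (-pivot)
        idx :: aGo (rest.map (fun row =>
          if PySem.Int.band row lsb ≠ 0 then PySem.Int.bxor row pivot else row)) (idx - 1)
      else aGo rest (idx - 1)
termination_by rev _ => rev.length
decreasing_by all_goals simp

def gf2_find_indp (rows : List Int) : List Int :=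
  aGo rows.reverse ((rows.length : Int) - 1)

-- ===== PORT B =====
-- 'for i in range(len(rows)-1, -1, -1): v = rows[i]; …' ported as recursion over the
-- reversed list carrying the descending index; the inner 'for p in pivots' is a foldl.
def bReduce (pivots : List Int) (v : Int) : Int :=
  pivots.foldl (fun v p =>
    if PySem.Int.band v (PySem.Int.band p (-p)) ≠ 0 then PySem.Int.bxor v p else v) v

def bGo : List Int → List Int → Int → List Int
  | [], _, _ => []
  | r :: rest, pivots, idx =>
      let v := bReduce pivots r
      if v ≠ 0 then idx :: bGo rest (pivots ++ [v]) (idx - 1)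
      else bGo rest pivots (idx - 1)

def gf2_find_indp_alt (rows : List Int) : List Int :=
  bGo rows.reverse [] ((rows.length : Int) - 1)

-- ===== PRECONDITION & SPEC =====
def Spec_gf2_find_indp (rows : List Int) (out : List Int) : Prop := out = gf2_find_indp_alt rows
instance (rows : List Int) (out : List Int) : Decidable (Spec_gf2_find_indp rows out) := by unfold Spec_gf2_find_indp; infer_instance

-- ===== CLAIM (what is proved, stated in full; the proofs are below) =====
def Claim_equal_gf2_find_indp : Prop := ∀ (rows : List Int), Dom_gf2_find_indp rows → Spec_gf2_find_indp rows (gf2_find_indp rows)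

-- ===== LEMMAS AND PROOFS =====

-- reducing against one more pivot = reducing, then applying that pivot's elimination step
theorem bReduce_append (pivots : List Int) (v x : Int) :
    bReduce (pivots ++ [v]) x =
      (if PySem.Int.band (bReduce pivots x) (PySem.Int.band v (-v)) ≠ 0
       then PySem.Int.bxor (bReduce pivots x) v else bReduce pivots x) := by
  simp [bReduce, List.foldl_append]

-- coupling invariant: A run on the lazily-reduced remaining rows = B run with that pivot list
theorem aGo_eq_bGo (rev : List Int) :
    ∀ (pivots : List Int) (idx : Int),
      aGo (rev.map (bReduce pivots)) idx = bGo rev pivots idx := by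
  induction rev with
  | nil => intro pivots idx; simp [aGo, bGo]
  | cons r rest ih =>
      intro pivots idx
      by_cases h : bReduce pivots r = 0
      · simp [aGo, bGo, h, ih]
      · simp only [List.map_cons, aGo, bGo, h, ne_eq, not_false_iff,
          if_true]
        have : (rest.map (bReduce pivots)).map
            (fun row => if PySem.Int.band row (PySem.Int.band (bReduce pivots r)
                (-(bReduce pivots r))) ≠ 0
              then PySem.Int.bxor row (bReduce pivots r) else row)
            = rest.map (bReduce (pivots ++ [bReduce pivots r])) := by
          rw [List.map_map]
          refine List.map_congr_left (fun x _ => ?_)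
          simp [bReduce_append]
        simp only [this, ih]

theorem bReduce_nil (x : Int) : bReduce [] x = x := rfl

-- ===== VERDICT (by name: the statement is the Claim_ definition above) =====
theorem gf2_find_indp_spec : Claim_equal_gf2_find_indp := by
  intro rows _
  unfold Spec_gf2_find_indp gf2_find_indp gf2_find_indp_alt
  rw [← aGo_eq_bGo rows.reverse [] ((rows.length : Int) - 1)]
  congr 1
  exact Eq.symm (List.map_congr_left (fun x _ => bReduce_nil x)) |>.trans (List.map_id _) |>.symm
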